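-- pv_equiv track=rewrite | github.com/minari-samgyeopsal/meeting-agent | src/utils/status_formatter.py | _summarize_artifacts
-- ===== SOURCE A (Python) =====
-- def _summarize_artifacts(artifacts: list) -> str:
--     if not artifacts:
--         return "없음"
--
--     counts = {}
--     for artifact in artifacts:
--         artifact_type = artifact.get("type", "unknown")
--         counts[artifact_type] = counts.get(artifact_type, 0) + 1
--
--     ordered_keys = sorted(counts.keys())
--     return ", ".join(f"{key} {counts[key]}개" for key in ordered_keys)
-- ===== SOURCE B (Python) =====
-- from itertools import groupby
--
--
-- def _summarize_artifacts(artifacts: list) -> str: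
--     if not artifacts:
--         return "없음"
--
--     key = lambda artifact: artifact.get("type", "unknown")
--     parts = []
--     for artifact_type, group in groupby(sorted(artifacts, key=key), key=key):
--         count = sum(1 for _ in group)
--         parts.append(f"{artifact_type} {count}개")
--     return ", ".join(parts)
-- ===== Notes on version B (the rewrite author's own statement) =====
-- stated objective: alternative
-- what changed: Replaces A's dict-counting pass followed by sorting the distinct keys with a sort of the artifacts by their type key followed by a single itertools.groupby run-length scan.
import Mathlib
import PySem

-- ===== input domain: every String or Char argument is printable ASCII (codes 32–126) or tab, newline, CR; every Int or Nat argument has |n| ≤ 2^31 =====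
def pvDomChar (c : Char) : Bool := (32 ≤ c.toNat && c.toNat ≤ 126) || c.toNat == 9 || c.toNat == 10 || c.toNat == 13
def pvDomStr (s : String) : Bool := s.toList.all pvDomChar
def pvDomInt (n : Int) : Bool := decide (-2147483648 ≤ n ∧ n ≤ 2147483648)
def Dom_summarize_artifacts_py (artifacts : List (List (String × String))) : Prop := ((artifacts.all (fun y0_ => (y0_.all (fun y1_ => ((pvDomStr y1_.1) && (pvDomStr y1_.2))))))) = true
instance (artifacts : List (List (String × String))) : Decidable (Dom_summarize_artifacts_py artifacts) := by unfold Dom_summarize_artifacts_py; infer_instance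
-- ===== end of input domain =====

-- B replaces A's hash-count-then-sort-keys strategy with a sort-then-groupby traversal (objective: alternative).

-- ===== PORT A =====
-- counts[t] = counts.get(t, 0) + 1 over the artifact list, then sorted keys joined
def summarize_artifacts_py (artifacts : List (List (String × String))) : String :=
  if artifacts = [] then "없음"
  else
    let counts : PySem.Dict String Int :=
      artifacts.foldl (fun d artifact =>
        let artifact_type := (PySem.Dict.mk artifact).getD "type" "unknown"
        d.insert artifact_type (d.getD artifact_type 0 + 1)) PySem.Dict.empty
    let ordered_keys := PySem.List.sorted counts.keys (fun x => x) false
    PySem.Str.join ", " (ordered_keys.map (fun key => key ++ " " ++ PySem.Int.toStr (counts.getD key 0) ++ "개"))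

-- ===== PORT B =====
-- key = lambda artifact: artifact.get("type", "unknown")
def pvBKey (artifact : List (String × String)) : String :=
  (PySem.Dict.mk artifact).getD "type" "unknown"

-- itertools.groupby over a list of keys: (key, length of the run) per maximal run
def pvGroupRuns : List String → List (String × Int)
  | [] => []
  | k :: rest =>
      (k, ((rest.takeWhile (fun x => x == k)).length : Int) + 1) ::
        pvGroupRuns (rest.dropWhile (fun x => x == k))
termination_by ms => ms.length
decreasing_by
  simpa using Nat.lt_succ_of_le (List.length_dropWhile_le _ _)

def summarize_artifacts_py_alt (artifacts : List (List (String × String))) : String :=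
  if artifacts = [] then "없음"
  else
    let groups := pvGroupRuns ((PySem.List.sorted artifacts pvBKey false).map pvBKey)
    PySem.Str.join ", " (groups.map (fun g => g.1 ++ " " ++ PySem.Int.toStr g.2 ++ "개"))

-- ===== PRECONDITION & SPEC =====
def Spec_summarize_artifacts_py (artifacts : List (List (String × String))) (out : String) : Prop := out = summarize_artifacts_py_alt artifacts
instance (artifacts : List (List (String × String))) (out : String) : Decidable (Spec_summarize_artifacts_py artifacts out) := by unfold Spec_summarize_artifacts_py; infer_instance

-- ===== CLAIM (what is proved, stated in full; the proofs are below) =====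
def Claim_equal_summarize_artifacts_py : Prop := ∀ (artifacts : List (List (String × String))), Dom_summarize_artifacts_py artifacts → Spec_summarize_artifacts_py artifacts (summarize_artifacts_py artifacts)

-- ===== LEMMAS AND PROOFS =====

-- On a ≤-sorted key list, groupby runs are exactly the sorted distinct keys with their counts.
theorem pvGroupRuns_eq (ms : List String) (h : ms.Pairwise (· ≤ ·)) :
    pvGroupRuns ms =
      (PySem.List.sorted (PySem.Set.ofList ms) (fun x => x) false).map
        (fun k => (k, (ms.count k : Int))) := by
  induction ms using pvGroupRuns.induct with
  | case1 => simp [pvGroupRuns, PySem.List.sorted_eq_nil_iff]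
  | case2 k rest ih =>
    set t := rest.takeWhile (fun x => x == k) with ht
    set d := rest.dropWhile (fun x => x == k) with hd
    have hrest : t ++ d = rest := List.takeWhile_append_dropWhile
    have hpr : rest.Pairwise (· ≤ ·) := h.of_cons
    have hkle : ∀ x ∈ rest, k ≤ x := fun x hx => List.rel_of_pairwise_cons h hx
    have hpd : d.Pairwise (· ≤ ·) := hpr.sublist (List.dropWhile_sublist _)
    have htk : ∀ x ∈ t, x = k := fun x hx => by
      simpa using List.mem_takeWhile_imp hx
    -- every element of d is strictly greater than k
    have hdk : ∀ x ∈ d, k < x := by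
      intro x hx
      rcases hde : d with _ | ⟨d0, d'⟩
      · simp [hde] at hx
      · have hw : List.dropWhile (fun x => x == k) rest ≠ [] := by
          rw [← hd, hde]; simp
        have hh := List.head_dropWhile_not (fun x => x == k) hw
        have hhead : (List.dropWhile (fun x => x == k) rest).head hw = d0 := by
          have : List.dropWhile (fun x => x == k) rest = d0 :: d' := by rw [← hd, hde]
          simp [this]
        have hd0ne : ¬ (d0 = k) := by
          rw [hhead] at hh; simpa using hh
        have hd0mem : d0 ∈ rest := (List.dropWhile_sublist _).subset (by rw [← hd, hde]; simp)
        have hd0gt : k < d0 := lt_of_le_of_ne (hkle d0 hd0mem) (fun e => hd0ne e.symm)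
        rw [hde] at hx
        rcases List.mem_cons.mp hx with rfl | hx'
        · exact hd0gt
        · have : d0 ≤ x := List.rel_of_pairwise_cons (by rw [hde] at hpd; exact hpd) hx'
          exact lt_of_lt_of_le hd0gt this
    have hknd : k ∉ d := fun hk => lt_irrefl k (hdk k hk)
    -- counts
    have hcountk : (k :: rest).count k = t.length + 1 := by
      rw [← hrest, List.count_cons_self, List.count_append,
        List.count_eq_length.mpr (fun b hb => (htk b hb).symm),
        List.count_eq_zero.mpr hknd]
    have hcountd : ∀ x ∈ d, (k :: rest).count x = d.count x := by
      intro x hx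
      have hxk : x ≠ k := fun e => hknd (e ▸ hx)
      have h1 : t.count x = 0 := List.count_eq_zero.mpr (fun hxt => hxk (htk x hxt))
      rw [← hrest]
      simp only [List.count_cons, List.count_append, h1, beq_iff_eq]
      simp [Ne.symm hxk]
    -- the sorted distinct keys split as k :: sorted distinct keys of d
    have hsd : PySem.List.sorted (PySem.Set.ofList (k :: rest)) (fun x => x) false =
        k :: PySem.List.sorted (PySem.Set.ofList d) (fun x => x) false := by
      apply PySem.List.sorted_eq_of_perm_of_pairwise_lt
      · apply (List.perm_ext_iff_of_nodup _ (PySem.Set.nodup_ofList _)).mpr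
        · intro x
          simp only [PySem.Set.mem_ofList, List.mem_cons, PySem.List.mem_sorted]
          constructor
          · rintro (rfl | hx)
            · exact .inl rfl
            · exact .inr ((List.dropWhile_sublist _).subset hx)
          · rintro (rfl | hx)
            · exact .inl rfl
            · rw [← hrest] at hx
              rcases List.mem_append.mp hx with hx | hx
              · exact .inl (htk x hx)
              · exact .inr hx
        · refine List.nodup_cons.mpr ⟨fun hk => ?_, ?_⟩
          · exact hknd (by simpa [PySem.List.mem_sorted, PySem.Set.mem_ofList] using hk)
          · exact ((PySem.List.sorted_perm _ _ _).nodup_iff).mpr (PySem.Set.nodup_ofList d)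
      · refine List.pairwise_cons.mpr ⟨?_, ?_⟩
        · intro x hx
          exact hdk x (by simpa [PySem.List.mem_sorted, PySem.Set.mem_ofList] using hx)
        · exact PySem.List.sorted_ofList_pairwise_lt d
    rw [pvGroupRuns, hsd, List.map_cons, ih hpd, hcountk, Nat.cast_add, Nat.cast_one]
    exact congrArg _ (List.map_congr_left (fun x hx => by
      rw [hcountd x (by simpa [PySem.List.mem_sorted, PySem.Set.mem_ofList] using hx)]))

theorem summarize_artifacts_py_spec' (artifacts : List (List (String × String))) :
    summarize_artifacts_py artifacts = summarize_artifacts_py_alt artifacts := by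
  by_cases he : artifacts = []
  · simp [summarize_artifacts_py, summarize_artifacts_py_alt, he]
  · unfold summarize_artifacts_py summarize_artifacts_py_alt
    simp only [if_neg he]
    set ks := artifacts.map pvBKey with hks
    set ms := (PySem.List.sorted artifacts pvBKey false).map pvBKey with hms
    have hcounter : artifacts.foldl (fun d artifact =>
        let artifact_type := (PySem.Dict.mk artifact).getD "type" "unknown"
        d.insert artifact_type (d.getD artifact_type 0 + 1)) PySem.Dict.empty
        = PySem.Dict.counter ks := by
      rw [hks, ← PySem.Dict.foldl_insert_getD_add_one_eq_counter, List.foldl_map]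
      rfl
    have hperm : ms.Perm ks := (PySem.List.sorted_perm artifacts pvBKey false).map pvBKey
    have hpw : ms.Pairwise (· ≤ ·) := PySem.List.sorted_map_key_pairwise artifacts pvBKey
    have hofl : (PySem.Set.ofList ms : List String).Perm (PySem.Set.ofList ks) := by
      apply (List.perm_ext_iff_of_nodup (PySem.Set.nodup_ofList _) (PySem.Set.nodup_ofList _)).mpr
      intro x
      simp only [PySem.Set.mem_ofList]
      exact ⟨fun h => hperm.mem_iff.mp h, fun h => hperm.mem_iff.mpr h⟩
    have hsorteq : PySem.List.sorted (PySem.Set.ofList ms) (fun x => x) false =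
        PySem.List.sorted (PySem.Set.ofList ks) (fun x => x) false :=
      (PySem.List.sorted_id_eq_sorted_id_iff_perm _ _).mpr hofl
    rw [hcounter, pvGroupRuns_eq ms hpw, hsorteq, PySem.Dict.keys_counter, List.map_map]
    congr 1
    apply List.map_congr_left
    intro k _
    simp only [Function.comp, PySem.Dict.getD_counter, hperm.count_eq]

-- ===== VERDICT (by name: the statement is the Claim_ definition above) =====
theorem summarize_artifacts_py_spec : Claim_equal_summarize_artifacts_py := by
  intro artifacts _
  exact summarize_artifacts_py_spec' artifacts
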